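-- pv_equiv track=rewrite | github.com/xrose3159/agentic_VLMdata_with_graph | step2_enrich.py | _has_l3_chains
-- ===== SOURCE A (Python) =====
-- def _has_l3_chains(triples: list, entities: list) -> bool:
--     from collections import defaultdict
--
--     nodes = set()
--     adjacency = defaultdict(list)
--     for t in triples:
--         h = t.get("head", "").strip().lower()
--         tail = t.get("tail", "").strip().lower()
--         if not h or not tail or h == tail:
--             continue
--         nodes.add(h)
--         nodes.add(tail)
--         adjacency[h].append(tail)
--
--     for start in nodes:
--         stack = [(start, {start}, 0)]
--         while stack:
--             curr, visited, depth = stack.pop()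
--             if depth >= 3:
--                 return True
--             for nxt in adjacency.get(curr, []):
--                 if nxt not in visited:
--                     stack.append((nxt, visited | {nxt}, depth + 1))
--     return False
-- ===== SOURCE B (Python) =====
-- def _has_l3_chains(triples: list, entities: list) -> bool:
--     preds = {}
--     succs = {}
--     edges = set()
--     for t in triples:
--         h = t.get("head", "").strip().lower()
--         tl = t.get("tail", "").strip().lower()
--         if not h or not tl or h == tl:
--             continue
--         edges.add((h, tl))
--         succs.setdefault(h, set()).add(tl)
--         preds.setdefault(tl, set()).add(h)
--     # a simple 3-edge path p -> a -> b -> s exists iff for some middle edge (a, b)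
--     # there are a predecessor p of a and a successor s of b, both outside {a, b}, with p != s
--     for a, b in edges:
--         P = preds.get(a, ())
--         S = succs.get(b, ())
--         np = len(P) - (a in P) - (b in P)
--         ns = len(S) - (a in S) - (b in S)
--         if np == 0 or ns == 0:
--             continue
--         if np >= 2 or ns >= 2:
--             return True
--         # np == ns == 1: the unique candidates (the generators are order-independent here)
--         p = next(x for x in P if x != a and x != b)
--         s = next(x for x in S if x != a and x != b)
--         if p != s:
--             return True
--     return False
-- ===== Notes on version B (the rewrite author's own statement) =====
-- stated objective: alternative
-- what changed: Replaces the per-start-node depth-3 DFS with frozen visited-sets by a single pass that builds predecessor/successor sets per node and then, for each distinct edge (a,b) taken as the middle edge, decides via set sizes and membership tests whether a predecessor of a and a successor of b outside {a,b} and distinct from each other exist.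
import Mathlib
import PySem

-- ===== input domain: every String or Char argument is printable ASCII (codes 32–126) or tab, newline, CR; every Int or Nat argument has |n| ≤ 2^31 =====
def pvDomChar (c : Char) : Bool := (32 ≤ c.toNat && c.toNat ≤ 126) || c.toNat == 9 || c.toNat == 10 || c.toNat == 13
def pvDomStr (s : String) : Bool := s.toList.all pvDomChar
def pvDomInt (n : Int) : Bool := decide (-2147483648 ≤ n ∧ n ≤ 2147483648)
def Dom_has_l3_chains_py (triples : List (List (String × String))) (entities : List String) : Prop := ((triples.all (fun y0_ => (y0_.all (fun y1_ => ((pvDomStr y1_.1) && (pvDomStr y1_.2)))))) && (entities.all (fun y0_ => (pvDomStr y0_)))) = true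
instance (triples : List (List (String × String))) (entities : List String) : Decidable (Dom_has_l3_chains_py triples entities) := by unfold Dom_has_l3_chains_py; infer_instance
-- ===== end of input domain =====

-- B replaces A's per-start-node depth-3 DFS over frozen visited-sets by one build pass
-- (predecessor/successor sets per node) plus a size/membership test per distinct middle
-- edge (objective: alternative algorithm, same value everywhere).

-- ===== PORT A =====
-- shared by both ports: t.get(k, "") on the dict-as-association-list (first matching key),
-- then .strip().lower()
def pvGet (t : List (String × String)) (k : String) : String :=
  ((t.find? (fun p => p.1 == k)).map (fun p => p.2)).getD ""

def pvKey (t : List (String × String)) (k : String) : String :=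
  PySem.Str.lower (PySem.Str.strip (pvGet t k))

-- one iteration of A's first loop: nodes.add(h); nodes.add(tail); adjacency[h].append(tail),
-- skipping rows with empty or equal endpoints
def pvStepA (st : PySem.Set String × PySem.Dict String (List String))
    (t : List (String × String)) : PySem.Set String × PySem.Dict String (List String) :=
  let h := pvKey t "head"
  let tl := pvKey t "tail"
  if h = "" ∨ tl = "" ∨ h = tl then st
  else (PySem.Set.add (PySem.Set.add st.1 h) tl, st.2.modify h [] (fun l => l ++ [tl]))

-- termination bookkeeping for the DFS while-loop (cited by pvLoop's decreasing_by)
def pvBound (adj : PySem.Dict String (List String)) : Nat := (adj.values.map List.length).sum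

lemma pvGetD_length_le (adj : PySem.Dict String (List String)) (c : String) :
    (adj.getD c []).length ≤ pvBound adj := by
  unfold PySem.Dict.getD PySem.Dict.get? pvBound
  cases hf : adj.items.find? (fun p => p.1 == c) with
  | none => simp
  | some p =>
    simp only [hf, Option.map_some, Option.getD_some]
    have hmem : p ∈ adj.items := List.mem_of_find?_eq_some hf
    have : p.2.length ∈ (adj.values.map List.length) := by
      unfold PySem.Dict.values
      simp only [List.map_map, List.mem_map]
      exact ⟨p, hmem, rfl⟩
    exact List.le_sum_of_mem this

-- the accumulator shape of the push loop (cited by decreasing_by and by the proofs below)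
lemma pvFoldlPush {α β : Type} (p : α → Bool) (f : α → β) :
    ∀ (l : List α) (acc : List β),
      l.foldl (fun acc n => if p n then acc else f n :: acc) acc
        = ((l.filter (fun n => !p n)).map f).reverse ++ acc := by
  intro l
  induction l with
  | nil => intro acc; simp
  | cons x xs ih =>
    intro acc
    by_cases hx : p x = true
    · simp [List.foldl_cons, hx, ih]
    · simp only [Bool.not_eq_true] at hx
      simp [List.foldl_cons, hx, ih]

-- A's while-stack DFS; the stack top is the list head (Python pushes/pops at the end)
def pvLoop (adj : PySem.Dict String (List String)) :
    List (String × PySem.Set String × Nat) → Bool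
  | [] => false
  | (c, v, d) :: rest =>
    if 3 ≤ d then true
    else
      pvLoop adj ((adj.getD c []).foldl
        (fun acc n => if PySem.Set.contains v n then acc else (n, PySem.Set.add v n, d + 1) :: acc)
        [] ++ rest)
  termination_by stack => (stack.map (fun e => (pvBound adj + 1) ^ (4 - e.2.2))).sum
  decreasing_by
    rename_i hd
    simp only [dite_eq_ite]
    rw [pvFoldlPush]
    simp only [List.map_append, List.sum_append, List.map_reverse, List.sum_reverse,
      List.map_map, List.map_cons, List.sum_cons, List.map_nil, List.sum_nil]
    have hlen : ((adj.getD c []).filter (fun n => !PySem.Set.contains v n)).length ≤ pvBound adj :=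
      le_trans (List.length_filter_le _ _) (pvGetD_length_le adj c)
    have hcomp :
        (((adj.getD c []).filter (fun n => !PySem.Set.contains v n)).map
          ((fun e : String × PySem.Set String × Nat => (pvBound adj + 1) ^ (4 - e.2.2)) ∘
            (fun n => (n, PySem.Set.add v n, d + 1)))).sum
        = ((adj.getD c []).filter (fun n => !PySem.Set.contains v n)).length
            * (pvBound adj + 1) ^ (4 - (d + 1)) := by
      rw [show ((fun e : String × PySem.Set String × Nat => (pvBound adj + 1) ^ (4 - e.2.2)) ∘
            (fun n : String => (n, PySem.Set.add v n, d + 1)))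
          = (fun _ : String => (pvBound adj + 1) ^ (4 - (d + 1))) from rfl]
      rw [List.map_const', List.sum_replicate, smul_eq_mul]
    rw [hcomp]
    have he : 4 - d = (4 - (d + 1)) + 1 := by omega
    rw [he, pow_succ]
    have hx : 0 < (pvBound adj + 1) ^ (4 - (d + 1)) := pow_pos (Nat.succ_pos _) _
    have hlt : ((adj.getD c []).filter (fun n => !PySem.Set.contains v n)).length
        * (pvBound adj + 1) ^ (4 - (d + 1))
        < (pvBound adj + 1) ^ (4 - (d + 1)) * (pvBound adj + 1) := by
      rw [Nat.mul_comm ((pvBound adj + 1) ^ (4 - (d + 1)))]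
      exact Nat.mul_lt_mul_of_lt_of_le (Nat.lt_succ_of_le hlen) (le_refl _) hx
    omega

-- port of A ('for start in nodes: …' with its early returns is the any below; the Boolean
-- result is independent of the set's iteration order)
def has_l3_chains_py (triples : List (List (String × String))) (entities : List String) : Bool :=
  let st := triples.foldl pvStepA (PySem.Set.empty, PySem.Dict.empty)
  st.1.any (fun start => pvLoop st.2 [(start, PySem.Set.add PySem.Set.empty start, 0)])

-- ===== PORT B =====
-- one iteration of B's build loop: edges.add((h,tl)); succs.setdefault(h,set()).add(tl);
-- preds.setdefault(tl,set()).add(h)  (state components: (preds, succs, edges))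
def pvStepB
    (st : PySem.Dict String (PySem.Set String) × PySem.Dict String (PySem.Set String) ×
      PySem.Set (String × String)) (t : List (String × String)) :
    PySem.Dict String (PySem.Set String) × PySem.Dict String (PySem.Set String) ×
      PySem.Set (String × String) :=
  let h := pvKey t "head"
  let tl := pvKey t "tail"
  if h = "" ∨ tl = "" ∨ h = tl then st
  else (st.1.modify tl PySem.Set.empty (fun s => PySem.Set.add s h),
        st.2.1.modify h PySem.Set.empty (fun s => PySem.Set.add s tl),
        PySem.Set.add st.2.2 (h, tl))

-- B's per-middle-edge test; the match arm `| _, _ => false` only totalises Python's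
-- next(...): when that branch runs, np = ns = 1 guarantees both find? succeed
def pvEdgeTest (P S : PySem.Set String) (a b : String) : Bool :=
  let np : Int := PySem.Set.len P - (if PySem.Set.contains P a then 1 else 0)
    - (if PySem.Set.contains P b then 1 else 0)
  let ns : Int := PySem.Set.len S - (if PySem.Set.contains S a then 1 else 0)
    - (if PySem.Set.contains S b then 1 else 0)
  if np = 0 ∨ ns = 0 then false
  else if 2 ≤ np ∨ 2 ≤ ns then true
  else
    match P.find? (fun x => !(x == a) && !(x == b)), S.find? (fun x => !(x == a) && !(x == b)) with
    | some p, some s => !(p == s)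
    | _, _ => false

-- port of B (the for-loop over the edge set with early return is the any below)
def has_l3_chains_py_alt (triples : List (List (String × String))) (entities : List String) :
    Bool :=
  let st := triples.foldl pvStepB (PySem.Dict.empty, PySem.Dict.empty, PySem.Set.empty)
  st.2.2.any (fun e =>
    pvEdgeTest (st.1.getD e.1 PySem.Set.empty) (st.2.1.getD e.2 PySem.Set.empty) e.1 e.2)

-- ===== PRECONDITION & SPEC =====
-- A raises no exception on any input (all dict lookups carry defaults), so there is no Pre_.
def Spec_has_l3_chains_py (triples : List (List (String × String))) (entities : List String) (out : Bool) : Prop := out = has_l3_chains_py_alt triples entities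
instance (triples : List (List (String × String))) (entities : List String) (out : Bool) : Decidable (Spec_has_l3_chains_py triples entities out) := by unfold Spec_has_l3_chains_py; infer_instance

-- ===== CLAIM (what is proved, stated in full; the proofs are below) =====
def Claim_equal_has_l3_chains_py : Prop := ∀ (triples : List (List (String × String))) (entities : List String), Dom_has_l3_chains_py triples entities → Spec_has_l3_chains_py triples entities (has_l3_chains_py triples entities)

-- ===== LEMMAS AND PROOFS =====
-- Both programs are proved to decide pvHasP3 (pvEdges triples): "some simple directed path
-- with three edges exists among the kept (head, tail) pairs".
def pvEdges (triples : List (List (String × String))) : List (String × String) :=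
  triples.filterMap (fun t =>
    if pvKey t "head" = "" ∨ pvKey t "tail" = "" ∨ pvKey t "head" = pvKey t "tail" then none
    else some (pvKey t "head", pvKey t "tail"))

lemma pvEdges_cons (t : List (String × String)) (ts : List (List (String × String))) :
    pvEdges (t :: ts)
      = if pvKey t "head" = "" ∨ pvKey t "tail" = "" ∨ pvKey t "head" = pvKey t "tail"
        then pvEdges ts
        else (pvKey t "head", pvKey t "tail") :: pvEdges ts := by
  unfold pvEdges
  rw [List.filterMap_cons]
  split_ifs with hc <;> simp [hc]

lemma pvEdges_ne {triples : List (List (String × String))} {a b : String}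
    (h : (a, b) ∈ pvEdges triples) : a ≠ b := by
  simp only [pvEdges, List.mem_filterMap] at h
  obtain ⟨t, _, heq⟩ := h
  split_ifs at heq with hc
  simp only [Option.some_inj, Prod.mk.injEq] at heq
  obtain ⟨ha, hb⟩ := heq
  subst ha
  subst hb
  push_neg at hc
  exact hc.2.2

def pvHasP3 (L : List (String × String)) : Prop :=
  ∃ p a b s, (p, a) ∈ L ∧ (a, b) ∈ L ∧ (b, s) ∈ L ∧ p ≠ b ∧ p ≠ s ∧ a ≠ s

def pvExt (adj : PySem.Dict String (List String)) : String → PySem.Set String → Nat → Bool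
  | _, _, 0 => true
  | c, v, k+1 =>
      (adj.getD c []).any (fun n => !PySem.Set.contains v n && pvExt adj n (PySem.Set.add v n) k)

lemma pvExt_succ (adj : PySem.Dict String (List String)) (c : String) (v : PySem.Set String)
    (k : Nat) :
    pvExt adj c v (k + 1)
      = (adj.getD c []).any
          (fun n => !PySem.Set.contains v n && pvExt adj n (PySem.Set.add v n) k) := rfl

lemma pvExt_zero (adj : PySem.Dict String (List String)) (c : String) (v : PySem.Set String) :
    pvExt adj c v 0 = true := rfl

lemma pvLoop_eq_any (adj : PySem.Dict String (List String)) :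
    ∀ stack, pvLoop adj stack = stack.any (fun e => pvExt adj e.1 e.2.1 (3 - e.2.2)) := by
  intro stack
  fun_induction pvLoop adj stack with
  | case1 => simp
  | case2 c v d rest hd =>
    have h3 : 3 - d = 0 := by omega
    simp [pvExt, h3]
  | case3 c v d rest hd ih =>
    simp only [dite_eq_ite] at ih
    rw [ih]
    rw [pvFoldlPush]
    simp only [List.any_append, List.any_reverse, List.any_map, List.any_filter]
    have he : 3 - d = (3 - (d + 1)) + 1 := by omega
    rw [List.any_cons, he]
    simp [pvExt, Function.comp]

lemma foldA_adj (c : String) : ∀ (triples : List (List (String × String)))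
    (st : PySem.Set String × PySem.Dict String (List String)),
    ((triples.foldl pvStepA st).2).getD c []
      = st.2.getD c [] ++ ((pvEdges triples).filter (fun p => p.1 == c)).map (fun p => p.2) := by
  intro triples
  induction triples with
  | nil => intro st; simp [pvEdges]
  | cons t ts ih =>
    intro st
    rw [List.foldl_cons, ih, pvEdges_cons]
    simp only [pvStepA]
    split_ifs with hc
    · rfl
    · simp only [List.filter_cons]
      by_cases hch : pvKey t "head" = c
      · subst hch
        rw [PySem.Dict.getD_modify_self]
        simp only [beq_self_eq_true, if_pos, List.map_cons, List.append_assoc]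
        rfl
      · rw [PySem.Dict.getD_modify_of_ne _ _ _ (Ne.symm hch)]
        simp only [show ((pvKey t "head", pvKey t "tail").1 == c) = false from by
          simpa using hch]
        rfl

lemma foldA_nodes (x : String) : ∀ (triples : List (List (String × String)))
    (st : PySem.Set String × PySem.Dict String (List String)),
    x ∈ (triples.foldl pvStepA st).1 ↔ x ∈ st.1 ∨ ∃ p ∈ pvEdges triples, x = p.1 ∨ x = p.2 := by
  intro triples
  induction triples with
  | nil => intro st; simp [pvEdges]
  | cons t ts ih =>
    intro st
    rw [List.foldl_cons, ih, pvEdges_cons]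
    simp only [pvStepA]
    split_ifs with hc
    · rfl
    · simp only [PySem.Set.mem_add, List.mem_cons]
      constructor
      · rintro (((h | h) | h) | ⟨p, hp, hx⟩)
        · exact Or.inl h
        · exact Or.inr ⟨_, Or.inl rfl, Or.inl h⟩
        · exact Or.inr ⟨_, Or.inl rfl, Or.inr h⟩
        · exact Or.inr ⟨p, Or.inr hp, hx⟩
      · rintro (h | ⟨p, hp | hp, hx⟩)
        · exact Or.inl (Or.inl (Or.inl h))
        · subst hp
          rcases hx with hx | hx
          · exact Or.inl (Or.inl (Or.inr hx))
          · exact Or.inl (Or.inr hx)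
        · exact Or.inr ⟨p, hp, hx⟩

lemma adjA_mem (triples : List (List (String × String))) (c n : String) :
    n ∈ ((triples.foldl pvStepA (PySem.Set.empty, PySem.Dict.empty)).2).getD c []
      ↔ (c, n) ∈ pvEdges triples := by
  rw [foldA_adj]
  have h0 : (PySem.Dict.empty : PySem.Dict String (List String)).getD c [] = [] := rfl
  rw [h0, List.nil_append]
  simp only [List.mem_map, List.mem_filter, beq_iff_eq]
  constructor
  · rintro ⟨⟨p1, p2⟩, ⟨hp, h1⟩, h2⟩
    simp only at h1 h2
    subst h1; subst h2; exact hp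
  · intro h
    exact ⟨(c, n), ⟨h, rfl⟩, rfl⟩

lemma nodesA_mem (triples : List (List (String × String))) (x : String) :
    x ∈ (triples.foldl pvStepA (PySem.Set.empty, PySem.Dict.empty)).1
      ↔ ∃ p ∈ pvEdges triples, x = p.1 ∨ x = p.2 := by
  rw [foldA_nodes]
  simp [PySem.Set.empty]

lemma pvExt3_iff (adj : PySem.Dict String (List String)) (L : List (String × String))
    (hadj : ∀ c n, n ∈ adj.getD c [] ↔ (c, n) ∈ L) (s : String) :
    pvExt adj s (PySem.Set.add PySem.Set.empty s) 3 = true ↔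
      ∃ a b n, (s, a) ∈ L ∧ (a, b) ∈ L ∧ (b, n) ∈ L ∧
        a ≠ s ∧ b ≠ s ∧ b ≠ a ∧ n ≠ s ∧ n ≠ a ∧ n ≠ b := by
  have hcf : ∀ (v : PySem.Set String) (x : String),
      (PySem.Set.contains v x = false) ↔ x ∉ v := by intro v x; simp
  simp only [pvExt_succ, pvExt_zero, List.any_eq_true, Bool.and_eq_true, Bool.not_eq_true',
    Bool.and_true, hcf, PySem.Set.mem_add, hadj, PySem.Set.empty, List.not_mem_nil, false_or,
    not_or]
  tauto

lemma A_iff (triples : List (List (String × String))) (entities : List String) :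
    has_l3_chains_py triples entities = true ↔ pvHasP3 (pvEdges triples) := by
  unfold has_l3_chains_py
  simp only [List.any_eq_true]
  constructor
  · rintro ⟨start, hnode, hloop⟩
    rw [pvLoop_eq_any] at hloop
    simp only [List.any_cons, List.any_nil, Bool.or_false, Nat.sub_zero] at hloop
    rw [pvExt3_iff _ (pvEdges triples) (adjA_mem triples) start] at hloop
    obtain ⟨a, b, n, h1, h2, h3, _, hbs, _, hns, hna, _⟩ := hloop
    exact ⟨start, a, b, n, h1, h2, h3, Ne.symm hbs, Ne.symm hns, Ne.symm hna⟩
  · rintro ⟨p, a, b, s, h1, h2, h3, hpb, hps, has⟩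
    refine ⟨p, ?_, ?_⟩
    · rw [nodesA_mem]
      exact ⟨(p, a), h1, Or.inl rfl⟩
    · rw [pvLoop_eq_any]
      simp only [List.any_cons, List.any_nil, Bool.or_false, Nat.sub_zero]
      rw [pvExt3_iff _ (pvEdges triples) (adjA_mem triples) p]
      exact ⟨a, b, s, h1, h2, h3, Ne.symm (pvEdges_ne h1), Ne.symm hpb,
        Ne.symm (pvEdges_ne h2), Ne.symm hps, Ne.symm has, Ne.symm (pvEdges_ne h3)⟩

lemma foldB_preds (x a : String) : ∀ (triples : List (List (String × String))) st,
    x ∈ ((triples.foldl pvStepB st).1).getD a PySem.Set.empty ↔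
      x ∈ st.1.getD a PySem.Set.empty ∨ (x, a) ∈ pvEdges triples := by
  intro triples
  induction triples with
  | nil => intro st; simp [pvEdges]
  | cons t ts ih =>
    intro st
    rw [List.foldl_cons, ih, pvEdges_cons]
    simp only [pvStepB]
    split_ifs with hc
    · rfl
    · by_cases hat : a = pvKey t "tail"
      · subst hat
        rw [PySem.Dict.getD_modify_self]
        simp only [PySem.Set.mem_add, List.mem_cons, Prod.mk.injEq, and_true]
        exact or_assoc
      · rw [PySem.Dict.getD_modify_of_ne _ _ _ hat]
        simp only [List.mem_cons, Prod.mk.injEq]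
        constructor
        · rintro (h | h)
          · exact Or.inl h
          · exact Or.inr (Or.inr h)
        · rintro (h | ⟨h1, h2⟩ | h)
          · exact Or.inl h
          · exact absurd h2 hat
          · exact Or.inr h

lemma foldB_succs (x b : String) : ∀ (triples : List (List (String × String))) st,
    x ∈ ((triples.foldl pvStepB st).2.1).getD b PySem.Set.empty ↔
      x ∈ st.2.1.getD b PySem.Set.empty ∨ (b, x) ∈ pvEdges triples := by
  intro triples
  induction triples with
  | nil => intro st; simp [pvEdges]
  | cons t ts ih =>
    intro st
    rw [List.foldl_cons, ih, pvEdges_cons]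
    simp only [pvStepB]
    split_ifs with hc
    · rfl
    · by_cases hbh : b = pvKey t "head"
      · subst hbh
        rw [PySem.Dict.getD_modify_self]
        simp only [PySem.Set.mem_add, List.mem_cons, Prod.mk.injEq, true_and]
        exact or_assoc
      · rw [PySem.Dict.getD_modify_of_ne _ _ _ hbh]
        simp only [List.mem_cons, Prod.mk.injEq]
        constructor
        · rintro (h | h)
          · exact Or.inl h
          · exact Or.inr (Or.inr h)
        · rintro (h | ⟨h1, h2⟩ | h)
          · exact Or.inl h
          · exact absurd h1 hbh
          · exact Or.inr h

lemma foldB_edges (e : String × String) : ∀ (triples : List (List (String × String))) st,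
    e ∈ (triples.foldl pvStepB st).2.2 ↔ e ∈ st.2.2 ∨ e ∈ pvEdges triples := by
  intro triples
  induction triples with
  | nil => intro st; simp [pvEdges]
  | cons t ts ih =>
    intro st
    rw [List.foldl_cons, ih, pvEdges_cons]
    simp only [pvStepB]
    split_ifs with hc
    · rfl
    · simp only [PySem.Set.mem_add, List.mem_cons]
      exact or_assoc

lemma foldB_preds_nodup : ∀ (triples : List (List (String × String))) st,
    (∀ a, (st.1.getD a PySem.Set.empty).Nodup) →
      ∀ a, (((triples.foldl pvStepB st).1).getD a PySem.Set.empty).Nodup := by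
  intro triples
  induction triples with
  | nil => intro st h; exact h
  | cons t ts ih =>
    intro st h
    rw [List.foldl_cons]
    refine ih _ ?_
    intro a
    simp only [pvStepB]
    split_ifs with hc
    · exact h a
    · by_cases hat : a = pvKey t "tail"
      · subst hat
        rw [PySem.Dict.getD_modify_self]
        exact PySem.Set.nodup_add _ _ (h _)
      · rw [PySem.Dict.getD_modify_of_ne _ _ _ hat]
        exact h a

lemma foldB_succs_nodup : ∀ (triples : List (List (String × String))) st,
    (∀ b, (st.2.1.getD b PySem.Set.empty).Nodup) →
      ∀ b, (((triples.foldl pvStepB st).2.1).getD b PySem.Set.empty).Nodup := by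
  intro triples
  induction triples with
  | nil => intro st h; exact h
  | cons t ts ih =>
    intro st h
    rw [List.foldl_cons]
    refine ih _ ?_
    intro b
    simp only [pvStepB]
    split_ifs with hc
    · exact h b
    · by_cases hbh : b = pvKey t "head"
      · subst hbh
        rw [PySem.Dict.getD_modify_self]
        exact PySem.Set.nodup_add _ _ (h _)
      · rw [PySem.Dict.getD_modify_of_ne _ _ _ hbh]
        exact h b

lemma count_excl (a b : String) (hab : a ≠ b) : ∀ (P : PySem.Set String), P.Nodup →
    PySem.Set.len P - (if PySem.Set.contains P a then 1 else 0)
        - (if PySem.Set.contains P b then 1 else 0)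
      = ((P.filter (fun x => !(x == a) && !(x == b))).length : Int) := by
  intro P
  induction P with
  | nil => simp [PySem.Set.len, PySem.Set.contains]
  | cons x t ih =>
    intro hnd
    obtain ⟨hx, ht⟩ := List.nodup_cons.mp hnd
    specialize ih ht
    simp only [PySem.Set.len, PySem.Set.contains] at *
    by_cases hxa : x = a
    · subst hxa
      have h1 : (x :: t).contains x = true := by simp
      have h2 : t.contains x = false := by simpa using hx
      have h3 : (x :: t).contains b = t.contains b := by simp [Ne.symm hab]
      have h4 : (x :: t).filter (fun y => !(y == x) && !(y == b)) =
          t.filter (fun y => !(y == x) && !(y == b)) := by simp [List.filter_cons]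
      simp only [h1, h3, h4, List.length_cons, if_true]
      simp only [h2, Bool.false_eq_true, if_false] at ih
      split_ifs at ih ⊢ <;> push_cast at ih ⊢ <;> omega
    · by_cases hxb : x = b
      · subst hxb
        have h1 : (x :: t).contains x = true := by simp
        have h2 : t.contains x = false := by simpa using hx
        have h3 : (x :: t).contains a = t.contains a := by simp [Ne.symm hxa]
        have h4 : (x :: t).filter (fun y => !(y == a) && !(y == x)) =
            t.filter (fun y => !(y == a) && !(y == x)) := by simp [List.filter_cons]
        simp only [h1, h3, h4, List.length_cons, if_true]
        simp only [h2, Bool.false_eq_true, if_false] at ih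
        split_ifs at ih ⊢ <;> push_cast at ih ⊢ <;> omega
      · have hax : a ≠ x := fun h => hxa h.symm
        have hbx : b ≠ x := fun h => hxb h.symm
        have h3 : (x :: t).contains a = t.contains a := by simp [hax]
        have h5 : (x :: t).contains b = t.contains b := by simp [hbx]
        have h4 : (x :: t).filter (fun y => !(y == a) && !(y == b)) =
            x :: t.filter (fun y => !(y == a) && !(y == b)) := by
          simp [List.filter_cons, hxa, hxb]
        simp only [h3, h5, h4, List.length_cons]
        split_ifs at ih ⊢ <;> push_cast at ih ⊢ <;> omega

lemma two_mem_ne (l : List String) (hnd : l.Nodup) (hlen : 2 ≤ l.length) (z : String) :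
    ∃ w ∈ l, w ≠ z := by
  match l with
  | [] => simp at hlen
  | [x] => simp at hlen
  | x :: y :: t =>
    have hxy : x ≠ y := by
      rw [List.nodup_cons] at hnd
      exact fun h => hnd.1 (h ▸ List.mem_cons_self)
    by_cases hxz : x = z
    · refine ⟨y, by simp, fun h => hxy ?_⟩
      rw [hxz, h]
    · exact ⟨x, by simp, hxz⟩

lemma pvEdgeTest_iff (P S : PySem.Set String) (a b : String) (hP : P.Nodup) (hS : S.Nodup)
    (hab : a ≠ b) :
    pvEdgeTest P S a b = true ↔
      ∃ p ∈ P, p ≠ a ∧ p ≠ b ∧ ∃ s ∈ S, s ≠ a ∧ s ≠ b ∧ p ≠ s := by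
  simp only [pvEdgeTest]
  rw [count_excl a b hab P hP, count_excl a b hab S hS]
  set pred := (fun x => !(x == a) && !(x == b)) with hpred
  set P' := P.filter pred with hP'
  set S' := S.filter pred with hS'
  have hmP : ∀ p, p ∈ P' ↔ p ∈ P ∧ p ≠ a ∧ p ≠ b := by
    intro p; simp [hP', hpred, List.mem_filter]
  have hmS : ∀ s, s ∈ S' ↔ s ∈ S ∧ s ≠ a ∧ s ≠ b := by
    intro s; simp [hS', hpred, List.mem_filter]
  have hgoal : (∃ p ∈ P, p ≠ a ∧ p ≠ b ∧ ∃ s ∈ S, s ≠ a ∧ s ≠ b ∧ p ≠ s)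
      ↔ ∃ p ∈ P', ∃ s ∈ S', p ≠ s := by
    constructor
    · rintro ⟨p, hp, h1, h2, s, hs, h3, h4, h5⟩
      exact ⟨p, (hmP p).mpr ⟨hp, h1, h2⟩, s, (hmS s).mpr ⟨hs, h3, h4⟩, h5⟩
    · rintro ⟨p, hp, s, hs, h5⟩
      obtain ⟨hp0, h1, h2⟩ := (hmP p).mp hp
      obtain ⟨hs0, h3, h4⟩ := (hmS s).mp hs
      exact ⟨p, hp0, h1, h2, s, hs0, h3, h4, h5⟩
  rw [hgoal]
  have hndP' : P'.Nodup := hP.filter _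
  have hndS' : S'.Nodup := hS.filter _
  split_ifs with h1 h2
  · simp only [Bool.false_eq_true, false_iff]
    rintro ⟨p, hp, s, hs, -⟩
    rcases h1 with h | h
    · have h0 : P' = [] := List.length_eq_zero_iff.mp (by exact_mod_cast h)
      rw [h0] at hp; simp at hp
    · have h0 : S' = [] := List.length_eq_zero_iff.mp (by exact_mod_cast h)
      rw [h0] at hs; simp at hs
  · simp only [true_iff]
    push_neg at h1
    have hPne : P' ≠ [] := by
      intro h; rw [h] at h1; simp at h1
    have hSne : S' ≠ [] := by
      intro h; rw [h] at h1; simp at h1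
    obtain ⟨p0, hp0⟩ := List.exists_mem_of_ne_nil _ hPne
    obtain ⟨s0, hs0⟩ := List.exists_mem_of_ne_nil _ hSne
    rcases h2 with h | h
    · obtain ⟨p, hp, hpn⟩ := two_mem_ne P' hndP' (by exact_mod_cast h) s0
      exact ⟨p, hp, s0, hs0, hpn⟩
    · obtain ⟨s, hs, hsn⟩ := two_mem_ne S' hndS' (by exact_mod_cast h) p0
      exact ⟨p0, hp0, s, hs, Ne.symm hsn⟩
  · push_neg at h1 h2
    have hl1 : P'.length = 1 := by omega
    have hl2 : S'.length = 1 := by omega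
    obtain ⟨p, hp⟩ := List.length_eq_one_iff.mp hl1
    obtain ⟨s, hs⟩ := List.length_eq_one_iff.mp hl2
    have hfP : P.find? pred = some p := by
      rw [← List.head?_filter, ← hP', hp]; rfl
    have hfS : S.find? pred = some s := by
      rw [← List.head?_filter, ← hS', hs]; rfl
    rw [hfP, hfS]
    constructor
    · intro h
      have hps : p ≠ s := by simpa using h
      exact ⟨p, by rw [hp]; simp, s, by rw [hs]; simp, hps⟩
    · rintro ⟨p1, hp1, s1, hs1, hps⟩
      rw [hp] at hp1
      rw [hs] at hs1
      simp only [List.mem_singleton] at hp1 hs1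
      subst hp1; subst hs1
      simpa using hps

lemma B_iff (triples : List (List (String × String))) (entities : List String) :
    has_l3_chains_py_alt triples entities = true ↔ pvHasP3 (pvEdges triples) := by
  simp only [has_l3_chains_py_alt]
  rw [List.any_eq_true]
  have hemp : ∀ (k : String),
      ((PySem.Dict.empty : PySem.Dict String (PySem.Set String)).getD k PySem.Set.empty) = [] :=
    fun _ => rfl
  set st := triples.foldl pvStepB (PySem.Dict.empty, PySem.Dict.empty, PySem.Set.empty) with hst
  have hP : ∀ a x, x ∈ st.1.getD a PySem.Set.empty ↔ (x, a) ∈ pvEdges triples := by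
    intro a x
    rw [hst, foldB_preds]
    simp [hemp]
  have hS : ∀ b x, x ∈ st.2.1.getD b PySem.Set.empty ↔ (b, x) ∈ pvEdges triples := by
    intro b x
    rw [hst, foldB_succs]
    simp [hemp]
  have hE : ∀ e, e ∈ st.2.2 ↔ e ∈ pvEdges triples := by
    intro e
    rw [hst, foldB_edges]
    simp [PySem.Set.empty]
  have hPnd : ∀ a, (st.1.getD a PySem.Set.empty).Nodup := by
    rw [hst]
    exact foldB_preds_nodup triples _ (fun k => by rw [hemp]; exact List.nodup_nil)
  have hSnd : ∀ b, (st.2.1.getD b PySem.Set.empty).Nodup := by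
    rw [hst]
    exact foldB_succs_nodup triples _ (fun k => by rw [hemp]; exact List.nodup_nil)
  constructor
  · rintro ⟨⟨a, b⟩, he, htest⟩
    have heE : (a, b) ∈ pvEdges triples := (hE (a, b)).mp he
    have hab : a ≠ b := pvEdges_ne heE
    rw [pvEdgeTest_iff _ _ _ _ (hPnd a) (hSnd b) hab] at htest
    obtain ⟨p, hp, hpa, hpb, s, hs, hsa, hsb, hps⟩ := htest
    exact ⟨p, a, b, s, (hP a p).mp hp, heE, (hS b s).mp hs, hpb, hps, Ne.symm hsa⟩
  · rintro ⟨p, a, b, s, h1, h2, h3, hpb, hps, has⟩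
    refine ⟨(a, b), (hE (a, b)).mpr h2, ?_⟩
    rw [pvEdgeTest_iff _ _ _ _ (hPnd a) (hSnd b) (pvEdges_ne h2)]
    exact ⟨p, (hP a p).mpr h1, pvEdges_ne h1, hpb, s, (hS b s).mpr h3,
      Ne.symm has, Ne.symm (pvEdges_ne h3), hps⟩

-- ===== VERDICT (by name: the statement is the Claim_ definition above) =====
theorem has_l3_chains_py_spec : Claim_equal_has_l3_chains_py := by
  unfold Claim_equal_has_l3_chains_py
  intro triples entities _
  unfold Spec_has_l3_chains_py
  have hA := A_iff triples entities
  have hB := B_iff triples entities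
  cases hx : has_l3_chains_py triples entities <;>
    cases hy : has_l3_chains_py_alt triples entities <;> simp_all
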